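-- pv_equiv track=rewrite | github.com/thousandcows/programmers-python | level2/점프와순간이동.py | solution
-- ===== SOURCE A (Python) =====
-- def solution(n: int) -> int:
--     memoization = [0, 1, 1, 2]
--     for i in range(4, n + 1):
--         if i % 2 == 0:
--             memoization.append(min(memoization[i // 2], memoization[i - 1] + 1))
--         else:
--             memoization.append(memoization[i - 1] + 1)
--
--     return memoization[n]
-- ===== SOURCE B (Python) =====
-- def solution(n: int) -> int:
--     count = 0
--     while n:
--         count += n & 1
--         n >>= 1
--     return count
-- ===== Notes on version B (the rewrite author's own statement) =====
-- stated objective: faster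
-- what changed: Replaced the O(n) DP table memoization[0..n] with a direct O(log n) bit loop that accumulates the popcount of n with a single counter.
-- outside the precondition, e.g. on solution(-1): A returns 2, B does not finish within the time limit; on solution(-5): A raises IndexError, B does not finish within the time limit
import Mathlib
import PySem

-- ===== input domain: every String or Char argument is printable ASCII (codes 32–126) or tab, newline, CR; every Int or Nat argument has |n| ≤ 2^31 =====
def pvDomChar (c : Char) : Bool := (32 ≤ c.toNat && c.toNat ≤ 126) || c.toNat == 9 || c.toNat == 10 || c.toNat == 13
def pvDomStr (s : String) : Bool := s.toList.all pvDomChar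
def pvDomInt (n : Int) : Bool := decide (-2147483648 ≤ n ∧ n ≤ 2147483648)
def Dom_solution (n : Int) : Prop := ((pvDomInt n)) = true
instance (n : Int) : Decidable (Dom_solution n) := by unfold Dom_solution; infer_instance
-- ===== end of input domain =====

-- B replaces A's O(n) DP table with a single-accumulator bit loop (popcount), O(log n).

-- ===== PORT A =====
-- Python list indexing xs[i] (negative i from the end, none = IndexError), on an Array
-- (Array.push = list.append; an Array is used so the port evaluates in linear time).
def arrGet? (a : Array Int) (i : Int) : Option Int :=
  if 0 ≤ i then a[i.toNat]?
  else if 0 ≤ (a.size : Int) + i then a[((a.size : Int) + i).toNat]? else none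

-- A's loop body: append min(memo[i//2], memo[i-1]+1) for even i, memo[i-1]+1 for odd i.
def solutionStep (m : Array Int) (i : Int) : Array Int :=
  if PySem.Int.mod i 2 = 0 then
    m.push (min ((arrGet? m (PySem.Int.floordiv i 2)).getD 0)
                ((arrGet? m (i - 1)).getD 0 + 1))
  else
    m.push ((arrGet? m (i - 1)).getD 0 + 1)

def solution (n : Int) : Int :=
  let memoization := (PySem.List.pyRange 4 (n + 1) 1).foldl solutionStep #[0, 1, 1, 2]
  -- memoization[n]; arrGet? = none would be an IndexError, excluded by Pre_solution
  (arrGet? memoization n).getD 0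

-- ===== PORT B =====
-- B's `while n: count += n & 1; n >>= 1`; the guard n ≤ 0 makes it total in Lean
-- (B's Python loop never terminates for n < 0, which Pre_solution excludes).
def bitLoop (n count : Int) : Int :=
  if n ≤ 0 then count
  else bitLoop (PySem.Int.floordiv n 2) (count + PySem.Int.mod n 2)
termination_by n.toNat
decreasing_by
  have h2 : PySem.Int.floordiv n 2 = n / 2 := PySem.Int.floordiv_eq_ediv_of_pos (by norm_num)
  rw [h2]; omega

def solution_alt (n : Int) : Int := bitLoop n 0

-- ===== PRECONDITION & SPEC =====
-- Pre_ excludes n < 0, outside the problem's domain: there A raises IndexError (n ≤ -5)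
-- or returns an accidental negative-index value (-4 ≤ n ≤ -1), while B's bit loop diverges.
def Pre_solution (n : Int) : Prop := 0 ≤ n
instance (n : Int) : Decidable (Pre_solution n) := by unfold Pre_solution; infer_instance
def pvWitness_solution : Int := (6)

def Spec_solution (n : Int) (out : Int) : Prop := out = solution_alt n
instance (n : Int) (out : Int) : Decidable (Spec_solution n out) := by unfold Spec_solution; infer_instance

-- ===== CLAIM (what is proved, stated in full; the proofs are below) =====
def Claim_equal_solution : Prop := ∀ (n : Int), Dom_solution n → Pre_solution n → Spec_solution n (solution n)

-- ===== LEMMAS AND PROOFS =====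

-- accumulator lemma: the loop adds its total onto the running count
theorem bitLoop_acc_aux : ∀ (k : Nat) (n c : Int), n.toNat = k → bitLoop n c = c + bitLoop n 0 := by
  intro k
  induction k using Nat.strong_induction_on with
  | _ k ih =>
    intro n c hk
    by_cases h : n ≤ 0
    · conv_lhs => rw [bitLoop]
      conv_rhs => rw [bitLoop]
      simp [h]
    · have hd : PySem.Int.floordiv n 2 = n / 2 :=
        PySem.Int.floordiv_eq_ediv_of_pos (by norm_num)
      have hlt : (PySem.Int.floordiv n 2).toNat < k := by rw [hd]; omega
      rw [bitLoop, if_neg h, ih _ hlt _ _ rfl]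
      conv_rhs => rw [bitLoop, if_neg h, ih _ hlt _ _ rfl]
      ring

theorem bitLoop_acc (n c : Int) : bitLoop n c = c + bitLoop n 0 :=
  bitLoop_acc_aux n.toNat n c rfl

-- pc n = the value B computes
def pc (n : Int) : Int := bitLoop n 0

theorem pc_rec (n : Int) (h : 0 < n) : pc n = n % 2 + pc (n / 2) := by
  have hd : PySem.Int.floordiv n 2 = n / 2 := PySem.Int.floordiv_eq_ediv_of_pos (by norm_num)
  have hm : PySem.Int.mod n 2 = n % 2 := PySem.Int.mod_eq_emod_of_pos (by norm_num)
  unfold pc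
  rw [bitLoop, if_neg (by omega), hd, hm, bitLoop_acc]
  ring

theorem pc_nonpos (n : Int) (h : n ≤ 0) : pc n = 0 := by
  unfold pc; rw [bitLoop, if_pos h]

theorem pc_zero : pc 0 = 0 := pc_nonpos 0 (by norm_num)
theorem pc_one : pc 1 = 1 := by rw [pc_rec 1 (by norm_num)]; norm_num [pc_zero]
theorem pc_two : pc 2 = 1 := by rw [pc_rec 2 (by norm_num)]; norm_num [pc_one]
theorem pc_three : pc 3 = 2 := by rw [pc_rec 3 (by norm_num)]; norm_num [pc_one]

theorem pc_odd (i : Int) (h1 : 1 ≤ i) (h2 : i % 2 = 1) : pc i = pc (i - 1) + 1 := by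
  rcases eq_or_lt_of_le h1 with h | h
  · rw [← h]; norm_num [pc_one, pc_zero]
  · have e1 : (i - 1) % 2 = 0 := by omega
    have e2 : (i - 1) / 2 = i / 2 := by omega
    rw [pc_rec i (by omega), pc_rec (i - 1) (by omega), e1, e2, h2]; ring

theorem pc_even (i : Int) (h1 : 2 ≤ i) (h2 : i % 2 = 0) : pc i = pc (i / 2) := by
  rw [pc_rec i (by omega), h2]; ring

theorem pc_le_aux : ∀ (k : Nat) (m : Int), m.toNat = k → 1 ≤ m → pc m ≤ pc (m - 1) + 1 := by
  intro k
  induction k using Nat.strong_induction_on with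
  | _ k ih =>
    intro m hk h1
    rcases Int.emod_two_eq m with he | ho
    · -- m even, so m ≥ 2
      have hm2 : 2 ≤ m := by omega
      have hhalf : 1 ≤ m / 2 := by omega
      have ih' : pc (m / 2) ≤ pc (m / 2 - 1) + 1 := ih (m / 2).toNat (by omega) _ rfl hhalf
      have hodd : pc (m - 1) = 1 + pc (m / 2 - 1) := by
        rcases eq_or_lt_of_le hm2 with h2 | h2
        · rw [← h2]; norm_num [pc_one, pc_zero]
        · have e1 : (m - 1) % 2 = 1 := by omega
          have e2 : (m - 1) / 2 = m / 2 - 1 := by omega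
          rw [pc_rec (m - 1) (by omega), e1, e2]
      rw [pc_even m hm2 he, hodd]
      omega
    · rw [pc_odd m h1 ho]

theorem pc_le (m : Int) (h : 1 ≤ m) : pc m ≤ pc (m - 1) + 1 :=
  pc_le_aux m.toNat m rfl h

-- A's memo array holds pc j at every index j
theorem memo_inv (k : Nat) :
    ((PySem.List.pyRange 4 (4 + (k : Int)) 1).foldl solutionStep #[0, 1, 1, 2]).size = 4 + k ∧
    ∀ j : Nat, j < 4 + k →
      ((PySem.List.pyRange 4 (4 + (k : Int)) 1).foldl solutionStep #[0, 1, 1, 2])[j]? = some (pc j) := by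
  induction k with
  | zero =>
      rw [PySem.List.pyRange_one_eq_nil (by omega)]
      refine ⟨rfl, ?_⟩
      intro j hj
      interval_cases j
      · rw [show pc ((0 : Nat) : Int) = 0 by norm_num [pc_zero]]; decide
      · rw [show pc ((1 : Nat) : Int) = 1 by norm_num [pc_one]]; decide
      · rw [show pc ((2 : Nat) : Int) = 1 by norm_num [pc_two]]; decide
      · rw [show pc ((3 : Nat) : Int) = 2 by norm_num [pc_three]]; decide
  | succ k ih =>
      obtain ⟨hlen, hval⟩ := ih
      have hsplit : PySem.List.pyRange 4 (4 + ((k + 1 : Nat) : Int)) 1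
          = PySem.List.pyRange 4 (4 + (k : Int)) 1 ++ [4 + (k : Int)] := by
        have h44 : (4 + ((k + 1 : Nat) : Int)) = (4 + (k : Int)) + 1 := by push_cast; ring
        rw [h44, PySem.List.pyRange_one_succ_right (by omega)]
      rw [hsplit, List.foldl_append, List.foldl_cons, List.foldl_nil]
      set L := (PySem.List.pyRange 4 (4 + (k : Int)) 1).foldl solutionStep #[0, 1, 1, 2] with hL
      set i : Int := 4 + (k : Int) with hi
      have hi4 : 4 ≤ i := by omega
      have hgetAt : ∀ j : Int, 0 ≤ j → j < i → (arrGet? L j).getD 0 = pc j := by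
        intro j hj0 hji
        have hjn : j = ((j.toNat : Nat) : Int) := by omega
        unfold arrGet?
        rw [if_pos hj0, hval j.toNat (by omega)]
        simp only [Option.getD_some]
        rw [← hjn]
      have hget1 : (arrGet? L (i - 1)).getD 0 = pc (i - 1) :=
        hgetAt (i - 1) (by omega) (by omega)
      have hnewval : solutionStep L i = L.push (pc i) := by
        rcases Int.emod_two_eq i with he | ho
        · -- i even
          have hm : PySem.Int.mod i 2 = 0 := by
            rw [PySem.Int.mod_eq_emod_of_pos (by norm_num)]; exact he
          have hd : PySem.Int.floordiv i 2 = i / 2 :=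
            PySem.Int.floordiv_eq_ediv_of_pos (by norm_num)
          have hget2 : (arrGet? L (i / 2)).getD 0 = pc (i / 2) :=
            hgetAt (i / 2) (by omega) (by omega)
          have hmin : min (pc (i / 2)) (pc (i - 1) + 1) = pc (i / 2) := by
            apply min_eq_left
            have h1 : pc (i - 1) = 1 + pc (i / 2 - 1) := by
              have e1 : (i - 1) % 2 = 1 := by omega
              have e2 : (i - 1) / 2 = i / 2 - 1 := by omega
              rw [pc_rec (i - 1) (by omega), e1, e2]
            have h2 := pc_le (i / 2) (by omega)
            omega
          unfold solutionStep
          rw [if_pos hm, hd, hget2, hget1, hmin, ← pc_even i (by omega) he]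
        · -- i odd
          have hm : PySem.Int.mod i 2 = 1 := by
            rw [PySem.Int.mod_eq_emod_of_pos (by norm_num)]; exact ho
          unfold solutionStep
          rw [if_neg (by rw [hm]; norm_num), hget1, ← pc_odd i (by omega) ho]
      rw [hnewval]
      refine ⟨by simp only [Array.size_push, hlen]; omega, ?_⟩
      intro j hj
      rcases lt_or_ge j (4 + k) with hlt | hge
      · rw [Array.getElem?_push, if_neg (by omega), hval j hlt]
      · have hj4 : j = 4 + k := by omega
        subst hj4
        rw [Array.getElem?_push, if_pos (by omega)]
        congr 1
-- ===== VERDICT (by name: the statement is the Claim_ definition above) =====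
theorem solution_spec : Claim_equal_solution := by
  intro n _ hpre
  have hn0 : (0 : Int) ≤ n := hpre
  unfold Spec_solution solution solution_alt
  rcases lt_or_ge n 4 with h4 | h4
  · rw [PySem.List.pyRange_one_eq_nil (by omega)]
    simp only [List.foldl_nil]
    interval_cases n
    · have e : bitLoop 0 0 = 0 := pc_zero
      rw [e]; decide
    · have e : bitLoop 1 0 = 1 := pc_one
      rw [e]; decide
    · have e : bitLoop 2 0 = 1 := pc_two
      rw [e]; decide
    · have e : bitLoop 3 0 = 2 := pc_three
      rw [e]; decide
  · obtain ⟨hlen, hval⟩ := memo_inv (n - 3).toNat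
    have hb : (4 : Int) + ((n - 3).toNat : Int) = n + 1 := by omega
    rw [hb] at hlen hval
    have hnn : n = ((n.toNat : Nat) : Int) := by omega
    have key : (arrGet?
        ((PySem.List.pyRange 4 (n + 1) 1).foldl solutionStep #[0, 1, 1, 2]) n).getD 0 = pc n := by
      unfold arrGet?
      rw [if_pos hn0, hval n.toNat (by omega)]
      simp only [Option.getD_some]
      rw [← hnn]
    exact key
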